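-- pv_equiv track=rewrite | github.com/dephell/dephell_archive | dephell_archive/_stream.py | _dir_list
-- ===== SOURCE A (Python) =====
-- from typing import Optional, List, Set
--
-- def _dir_list(filelist: List[str]) -> Set[str]:
--     # paths starting with '/' or containing '.' are not supported
--     dir_list = set()  # type: Set[str]
--     for path in filelist:
--         while path:
--             path, _, _ = path.rpartition('/')
--             if not path or path in dir_list:
--                 break
--             dir_list.add(path)
--     return dir_list
-- ===== SOURCE B (Python) =====
-- def _dir_list(filelist):
--     # paths starting with '/' or containing '.' are not supported
--     dir_list = set()
--     for path in filelist:
--         for j in range(len(path) - 1, 0, -1):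
--             if path[j] == '/':
--                 dir_list.add(path[:j])
--     return dir_list
-- ===== Notes on version B (the rewrite author's own statement) =====
-- stated objective: simpler
-- what changed: B replaces A's while-loop of repeated rpartition calls with early break/membership-test by a single descending index scan over each path's characters, adding the prefix before every '/' found; the set's no-op add on duplicates makes the break unnecessary.
import Mathlib
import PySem

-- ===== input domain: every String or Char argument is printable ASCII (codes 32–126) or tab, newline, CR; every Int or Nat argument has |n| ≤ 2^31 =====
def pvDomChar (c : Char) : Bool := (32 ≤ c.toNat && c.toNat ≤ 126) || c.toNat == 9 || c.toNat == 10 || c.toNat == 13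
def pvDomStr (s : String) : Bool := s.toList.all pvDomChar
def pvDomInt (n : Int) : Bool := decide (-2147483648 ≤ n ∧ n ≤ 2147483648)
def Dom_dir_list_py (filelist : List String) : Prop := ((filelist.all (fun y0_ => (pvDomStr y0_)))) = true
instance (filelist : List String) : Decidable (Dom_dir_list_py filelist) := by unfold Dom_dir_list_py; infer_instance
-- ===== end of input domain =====

-- B replaces A's repeated-rpartition while-loop (with early break) by a single descending
-- character scan per path, adding the prefix before each '/'; objective: simpler.

-- ===== PORT A =====

-- hand port of `path.rpartition('/')[0]` (exact: the characters before the LAST '/', or '' if none)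
def rpartHead (cs : List Char) : List Char :=
  ((cs.reverse.dropWhile (fun c => c != '/')).tail).reverse

theorem rpartHead_length_lt (cs : List Char) (h : cs ≠ []) :
    (rpartHead cs).length < cs.length := by
  have h1 : (cs.reverse.dropWhile (fun c => c != '/')).length ≤ cs.length := by
    simpa using List.length_dropWhile_le (p := fun c => c != '/') (l := cs.reverse)
  have h2 : 0 < cs.length := List.length_pos_iff.mpr h
  simp [rpartHead]
  omega

-- the `while path:` loop body of A
def aLoop (s : PySem.Set String) (path : List Char) : PySem.Set String :=
  if hp : path = [] then s
  else
    let p := rpartHead path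
    if p.isEmpty || PySem.Set.contains s (String.ofList p) then s
    else aLoop (PySem.Set.add s (String.ofList p)) p
termination_by path.length
decreasing_by exact rpartHead_length_lt path hp

def dir_list_py (filelist : List String) : List String :=
  filelist.foldl (fun s path => aLoop s path.toList) PySem.Set.empty

-- ===== PORT B =====

-- the inner `for j in range(len(path)-1, 0, -1):` loop of B
-- (path[j] is ported with pyGetD: every j drawn from the range satisfies 0 < j < len path)
def bInner (s : PySem.Set String) (cs : List Char) : PySem.Set String :=
  (PySem.List.pyRange ((cs.length : Int) - 1) 0 (-1)).foldl
    (fun s j =>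
      if PySem.List.pyGetD cs j ' ' = '/'
      then PySem.Set.add s (String.ofList (PySem.List.slice cs none (some j)))
      else s) s

def dir_list_py_alt (filelist : List String) : List String :=
  filelist.foldl (fun s path => bInner s path.toList) PySem.Set.empty

-- ===== PRECONDITION & SPEC =====
def Spec_dir_list_py (filelist : List String) (out : List String) : Prop := out = dir_list_py_alt filelist
instance (filelist : List String) (out : List String) : Decidable (Spec_dir_list_py filelist out) := by unfold Spec_dir_list_py; infer_instance

-- ===== CLAIM (what is proved, stated in full; the proofs are below) =====
def Claim_equal_dir_list_py : Prop := ∀ (filelist : List String), Dom_dir_list_py filelist → Spec_dir_list_py filelist (dir_list_py filelist)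

-- ===== LEMMAS AND PROOFS =====

-- decomposition of a path at its last '/': either cs = rpartHead cs ++ '/' :: t with no '/' in t,
-- or cs has no '/' except possibly at index 0 (and then rpartHead cs = [])
theorem rpart_decomp (cs : List Char) :
    ∃ t, '/' ∉ t ∧ (cs = rpartHead cs ++ '/' :: t ∨ (rpartHead cs = [] ∧ (cs = t ∨ cs = '/' :: t))) := by
  have hsplit := List.takeWhile_append_dropWhile (p := fun c => c != '/') (l := cs.reverse)
  have hw : '/' ∉ ((cs.reverse.takeWhile (fun c => c != '/')).reverse) := by
    intro h
    rw [List.mem_reverse] at h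
    have := List.mem_takeWhile_imp h
    simp at this
  cases hr : cs.reverse.dropWhile (fun c => c != '/') with
  | nil =>
      refine ⟨(cs.reverse.takeWhile (fun c => c != '/')).reverse, hw, Or.inr ⟨?_, Or.inl ?_⟩⟩
      · simp [rpartHead, hr]
      · rw [hr, List.append_nil] at hsplit
        rw [hsplit, List.reverse_reverse]
  | cons c r' =>
      have hc : c = '/' := by
        have hne : cs.reverse.dropWhile (fun c => c != '/') ≠ [] := by rw [hr]; simp
        have h := List.head_dropWhile_not (fun c => c != '/') hne
        simp only [hr, List.head_cons] at h
        simpa using h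
      refine ⟨(cs.reverse.takeWhile (fun c => c != '/')).reverse, hw, Or.inl ?_⟩
      set w := cs.reverse.takeWhile (fun c => c != '/') with hwdef
      have hcs : cs = (w ++ c :: r').reverse := by
        rw [hr] at hsplit; rw [hsplit, List.reverse_reverse]
      have hhead : rpartHead cs = r'.reverse := by simp [rpartHead, hr]
      rw [hc] at hcs
      rw [hhead]
      conv_lhs => rw [hcs]
      simp

-- a fold step that never sees '/' adds nothing
theorem foldl_no_slash (cs : List Char) (l : List Int) (s : PySem.Set String)
    (h : ∀ j ∈ l, PySem.List.pyGetD cs j ' ' ≠ '/') :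
    l.foldl (fun s j =>
      if PySem.List.pyGetD cs j ' ' = '/'
      then PySem.Set.add s (String.ofList (PySem.List.slice cs none (some j)))
      else s) s = s := by
  induction l with
  | nil => rfl
  | cons j l ih =>
      simp only [List.foldl_cons]
      rw [if_neg (h j (by simp))]
      exact ih (fun j hj => h j (by simp [hj]))

-- bInner unfolds along the rpartition chain
theorem bInner_eq_step (s : PySem.Set String) (cs : List Char) :
    bInner s cs = if rpartHead cs = [] then s
                  else bInner (PySem.Set.add s (String.ofList (rpartHead cs))) (rpartHead cs) := by
  obtain ⟨t, ht, hcase⟩ := rpart_decomp cs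
  by_cases hz : rpartHead cs = []
  · rw [if_pos hz]
    have hshape : cs = t ∨ cs = '/' :: t := by
      rcases hcase with hdec | ⟨_, h⟩
      · right; rw [hdec, hz]; rfl
      · exact h
    apply foldl_no_slash
    intro j hj
    rw [PySem.List.mem_pyRange_neg_one] at hj
    have hjlen : (j : Int) < (cs.length : Int) := by omega
    have h0 : (0:Int) ≤ j := by omega
    rw [PySem.List.pyGetD_eq_getElem cs ' ' h0 hjlen]
    rcases hshape with h | h
    · subst h
      intro hcontra
      exact ht (hcontra ▸ List.getElem_mem _)
    · subst h
      have h1 : 1 ≤ j.toNat := by omega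
      obtain ⟨k, hk⟩ : ∃ k, j.toNat = k + 1 := ⟨j.toNat - 1, by omega⟩
      intro hcontra
      apply ht
      rw [← hcontra]
      have hklen : k < t.length := by
        simp at hjlen; omega
      have : ('/' :: t)[j.toNat]'(by simp; omega) = t[k]'hklen := by
        simp only [hk, List.getElem_cons_succ]
      rw [this]
      exact List.getElem_mem _
  · rw [if_neg hz]
    have hdec : cs = rpartHead cs ++ '/' :: t := by
      rcases hcase with h | ⟨h, _⟩
      · exact h
      · exact absurd h hz
    generalize hgen : rpartHead cs = p at hdec hz ⊢
    have hlen : cs.length = p.length + (t.length + 1) := by rw [hdec]; simp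
    have hp0 : 0 < p.length := List.length_pos_iff.mpr hz
    have hrange : PySem.List.pyRange ((cs.length : Int) - 1) 0 (-1)
        = PySem.List.pyRange ((cs.length : Int) - 1) (p.length) (-1)
          ++ PySem.List.pyRange (p.length) 0 (-1) := by
      rw [PySem.List.pyRange_neg_one_eq_reverse, PySem.List.pyRange_neg_one_eq_reverse,
        PySem.List.pyRange_neg_one_eq_reverse, ← List.reverse_append]
      congr 1
      rw [show ((cs.length : Int) - 1 + 1) = (cs.length : Int) by ring,
        show ((0 : Int) + 1) = 1 by ring]
      exact PySem.List.pyRange_one_append 1 ((p.length : Int) + 1) (cs.length : Int)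
        (by omega) (by omega)
    show (PySem.List.pyRange ((cs.length : Int) - 1) 0 (-1)).foldl _ s = _
    rw [hrange, List.foldl_append]
    -- the indices above p.length all point into t (after the '/'), so nothing is added
    rw [foldl_no_slash cs _ s ?_]
    · -- peel off the index p.length (the last '/')
      rw [PySem.List.pyRange_neg_one_cons (by omega : (0:Int) < (p.length:Int))]
      have hple : ((p.length : Int)).toNat = p.length := by omega
      have hgetstar : PySem.List.pyGetD cs (p.length : Int) ' ' = '/' := by
        rw [PySem.List.pyGetD_eq_getElem cs ' ' (by omega) (by omega)]
        rw [List.getElem_of_eq hdec]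
        rw [List.getElem_append_right (by omega)]
        simp [hple]
      simp only [List.foldl_cons]
      rw [if_pos hgetstar]
      have hslice : PySem.List.slice cs none (some (p.length : Int)) = p := by
        rw [PySem.List.slice_to cs (by omega)]
        rw [hple, hdec, List.take_append_of_le_length (by omega), List.take_length]
      rw [hslice]
      -- the remaining indices point into p: the fold is exactly bInner on p
      show _ = (PySem.List.pyRange ((p.length : Int) - 1) 0 (-1)).foldl _ _
      apply PySem.List.foldl_congr_mem
      intro acc j hj
      rw [PySem.List.mem_pyRange_neg_one] at hj
      have hgj : PySem.List.pyGetD cs j ' ' = PySem.List.pyGetD p j ' ' := by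
        rw [PySem.List.pyGetD_eq_getElem cs ' ' (by omega) (by omega),
          PySem.List.pyGetD_eq_getElem p ' ' (by omega) (by omega)]
        rw [List.getElem_of_eq hdec]
        exact List.getElem_append_left (by omega)
      have hsj : PySem.List.slice cs none (some j) = PySem.List.slice p none (some j) := by
        rw [PySem.List.slice_to cs (by omega), PySem.List.slice_to p (by omega)]
        rw [hdec, List.take_append_of_le_length (by omega)]
      rw [hgj, hsj]
    · intro j hj
      rw [PySem.List.mem_pyRange_neg_one] at hj
      rw [PySem.List.pyGetD_eq_getElem cs ' ' (by omega) (by omega)]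
      obtain ⟨k, hk⟩ : ∃ k, j.toNat - p.length = k + 1 := ⟨j.toNat - p.length - 1, by omega⟩
      intro hcontra
      apply ht
      rw [← hcontra]
      rw [List.getElem_of_eq hdec]
      rw [List.getElem_append_right (by omega)]
      have hklen : k < t.length := by omega
      have heq2 : ('/' :: t)[j.toNat - p.length]'(by simp; omega) = t[k]'hklen := by
        simp only [hk, List.getElem_cons_succ]
      rw [heq2]
      exact List.getElem_mem _

-- the global set is closed under taking the rpartition-ancestor
def closedS (s : List String) : Prop :=
  ∀ x ∈ s, rpartHead x.toList = [] ∨ String.ofList (rpartHead x.toList) ∈ s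

-- closed except possibly for the pending chain of cs
def Hprop (s : List String) (cs : List Char) : Prop :=
  ∀ x ∈ s, rpartHead x.toList = [] ∨ String.ofList (rpartHead x.toList) ∈ s ∨
    rpartHead x.toList = rpartHead cs

theorem set_add_of_mem (s : PySem.Set String) (x : String) (h : x ∈ s) :
    PySem.Set.add s x = s := by
  simp [PySem.Set.add, PySem.Set.contains, h]

-- on a closed set, re-folding an already-present chain changes nothing
theorem bInner_of_mem (n : Nat) : ∀ p : List Char, p.length = n → ∀ s : PySem.Set String,
    closedS s → String.ofList p ∈ s → bInner s p = s := by
  induction n using Nat.strong_induction_on with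
  | _ n ih =>
    intro p hn s hc hm
    rw [bInner_eq_step]
    by_cases hz : rpartHead p = []
    · simp [hz]
    · rw [if_neg hz]
      have hq : String.ofList (rpartHead p) ∈ s := by
        have := hc (String.ofList p) hm
        rw [String.toList_ofList] at this
        exact this.resolve_left hz
      rw [set_add_of_mem s _ hq]
      have hplt : (rpartHead p).length < n := by
        have hpne : p ≠ [] := by intro h; rw [h] at hz; exact hz rfl
        have := rpartHead_length_lt p hpne; omega
      exact ih _ hplt _ rfl s hc hq

-- main inner lemma: A's while-loop equals B's scan, and closedness is (re)established
theorem inner_main (n : Nat) : ∀ cs : List Char, cs.length = n → ∀ s : PySem.Set String,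
    Hprop s cs → aLoop s cs = bInner s cs ∧ closedS (aLoop s cs) := by
  induction n using Nat.strong_induction_on with
  | _ n ih =>
    intro cs hn s hH
    rw [aLoop]
    by_cases hcs : cs = []
    · subst hcs
      rw [dif_pos rfl]
      refine ⟨?_, ?_⟩
      · rfl
      · intro x hx
        rcases hH x hx with h | h | h
        · exact Or.inl h
        · exact Or.inr h
        · exact Or.inl (by simpa [rpartHead] using h)
    · rw [dif_neg hcs]
      by_cases hz : rpartHead cs = []
      · rw [if_pos (by simp [hz])]
        refine ⟨?_, ?_⟩
        · rw [bInner_eq_step, if_pos hz]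
        · intro x hx
          rcases hH x hx with h | h | h
          · exact Or.inl h
          · exact Or.inr h
          · exact Or.inl (by rw [h, hz])
      · by_cases hm : String.ofList (rpartHead cs) ∈ s
        · rw [if_pos (by simp; exact Or.inr hm)]
          have hclosed : closedS s := by
            intro x hx
            rcases hH x hx with h | h | h
            · exact Or.inl h
            · exact Or.inr h
            · exact Or.inr (by rw [h]; exact hm)
          refine ⟨?_, hclosed⟩
          rw [bInner_eq_step, if_neg hz, set_add_of_mem _ _ hm]
          exact (bInner_of_mem (rpartHead cs).length _ rfl s hclosed hm).symm
        · rw [if_neg (by simp [hz]; exact hm)]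
          have hlt : (rpartHead cs).length < n := by
            rw [← hn]; exact rpartHead_length_lt cs hcs
          have hH' : Hprop (PySem.Set.add s (String.ofList (rpartHead cs))) (rpartHead cs) := by
            intro x hx
            rw [PySem.Set.mem_add] at hx
            rcases hx with hx | rfl
            · rcases hH x hx with h | h | h
              · exact Or.inl h
              · exact Or.inr (Or.inl (by rw [PySem.Set.mem_add]; exact Or.inl h))
              · exact Or.inr (Or.inl (by rw [PySem.Set.mem_add, h]; exact Or.inr rfl))
            · rw [String.toList_ofList]
              exact Or.inr (Or.inr rfl)
          obtain ⟨heq, hcl⟩ := ih (rpartHead cs).length hlt (rpartHead cs) rfl _ hH'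
          refine ⟨?_, hcl⟩
          rw [heq, bInner_eq_step s cs, if_neg hz]

theorem outer (fl : List String) : ∀ s : PySem.Set String, closedS s →
    fl.foldl (fun s path => aLoop s path.toList) s
      = fl.foldl (fun s path => bInner s path.toList) s := by
  induction fl with
  | nil => intro s _; rfl
  | cons x fl ih =>
      intro s hc
      have hH : Hprop s x.toList := fun y hy => by
        rcases hc y hy with h | h
        · exact Or.inl h
        · exact Or.inr (Or.inl h)
      obtain ⟨heq, hcl⟩ := inner_main x.toList.length x.toList rfl s hH
      simp only [List.foldl_cons]
      rw [← heq]
      exact ih _ hcl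

-- ===== VERDICT (by name: the statement is the Claim_ definition above) =====
theorem dir_list_py_spec : Claim_equal_dir_list_py := by
  intro fl _
  unfold Spec_dir_list_py dir_list_py dir_list_py_alt
  exact outer fl PySem.Set.empty (fun x hx => by cases hx)
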